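-- pv_equiv track=rewrite | github.com/crwilcox/advent-of-code | 2023/day14/day14.py | tilt_col_north
-- ===== SOURCE A (Python) =====
-- ROUNDROCK = "O"
--
-- CUBEDROCK = "#"
--
-- def tilt_col_north(col) -> list[str]:
--     new_col = []
--     for idx, val in enumerate(col):
--         if val == ROUNDROCK:
--             new_col.append(ROUNDROCK)
--         if val == CUBEDROCK:
--             # we can't move rocks more from here.
--             # we need to pad out and place the cube rock
--             empty_squares = idx - len(new_col)
--             for _ in range(empty_squares):
--                 new_col.append(".")
--             new_col.append(CUBEDROCK)
--
--     # check padding. make sure they are the same length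
--     empty_squares = idx - len(new_col)
--     while len(new_col) != len(col):
--         new_col.append(".")
--     return new_col
-- ===== SOURCE B (Python) =====
-- def tilt_col_north(col) -> list[str]:
--     # Divide and conquer: split at the first cube rock, solve each side recursively;
--     # a '#'-free column is just its round rocks followed by empties.
--     if "#" in col:
--         i = col.index("#")
--         return tilt_col_north(col[:i]) + ["#"] + tilt_col_north(col[i + 1:])
--     k = col.count("O")
--     return ["O"] * k + ["."] * (len(col) - k)
-- ===== Notes on version B (the rewrite author's own statement) =====
-- stated objective: alternative
-- what changed: B is a recursive divide-and-conquer: it finds the first '#' with index, recurses on the slices on either side, and solves a '#'-free column by count('O') and list-repetition; A is an iterative single pass streaming per-element appends with index-based back-padding and a final while-loop pad.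
import Mathlib
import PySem

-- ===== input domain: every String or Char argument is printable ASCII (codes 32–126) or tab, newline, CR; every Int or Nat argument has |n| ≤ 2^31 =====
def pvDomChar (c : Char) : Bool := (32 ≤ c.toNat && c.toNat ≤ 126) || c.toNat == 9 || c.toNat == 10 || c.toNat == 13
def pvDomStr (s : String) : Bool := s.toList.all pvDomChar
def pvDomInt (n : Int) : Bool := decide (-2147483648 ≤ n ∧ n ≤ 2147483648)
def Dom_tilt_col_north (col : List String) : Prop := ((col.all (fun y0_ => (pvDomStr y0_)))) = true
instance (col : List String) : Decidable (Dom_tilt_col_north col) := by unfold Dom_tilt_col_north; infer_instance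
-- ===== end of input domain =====

-- B replaces A's streaming single pass by recursive divide-and-conquer at the first '#'; return values proved equal on non-empty columns.

-- ===== PORT A =====
-- Python loop `for idx, val in enumerate(col)` carrying new_col; the inner `for _ in range(empty_squares)` pad is List.replicate.
def tiltA_loop : List String → Nat → List String → List String
  | [], _, nc => nc
  | val :: rest, idx, nc =>
    let nc1 := if val = "O" then nc ++ ["O"] else nc
    let nc2 := if val = "#" then nc1 ++ List.replicate (idx - nc1.length) "." ++ ["#"] else nc1
    tiltA_loop rest (idx + 1) nc2

-- final `while len(new_col) != len(col): append "."` (new_col is never longer than col)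
def tilt_col_north (col : List String) : List String :=
  let nc := tiltA_loop col 0 []
  nc ++ List.replicate (col.length - nc.length) "."

-- ===== PORT B =====
-- `"#" in col` / `col.index("#")` is PySem.List.index?; the slices col[:i] and col[i+1:]
-- with i : Nat are exactly take i / drop (i+1) (PySem.List.slice_to_natCast / slice_from_natCast).
def tilt_col_north_alt (col : List String) : List String :=
  match h : PySem.List.index? col "#" with
  | some i =>
      tilt_col_north_alt (col.take i) ++ ["#"] ++ tilt_col_north_alt (col.drop (i + 1))
  | none =>
      List.replicate (PySem.List.count col "O") "O" ++
        List.replicate (col.length - PySem.List.count col "O") "."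
termination_by col.length
decreasing_by
  · obtain ⟨hk, -, -⟩ := PySem.List.getElem_of_index?_eq_some h
    simp; omega
  · obtain ⟨hk, -, -⟩ := PySem.List.getElem_of_index?_eq_some h
    simp; omega

-- ===== PRECONDITION & SPEC =====
-- Pre_ excludes only the empty column, where A raises NameError (the dead post-loop line reads idx).
def Pre_tilt_col_north (col : List String) : Prop := col ≠ []
instance (col : List String) : Decidable (Pre_tilt_col_north col) := by unfold Pre_tilt_col_north; infer_instance
def pvWitness_tilt_col_north : List String := ["O", ".", "#", "O"]

def Spec_tilt_col_north (col : List String) (out : List String) : Prop := out = tilt_col_north_alt col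
instance (col : List String) (out : List String) : Decidable (Spec_tilt_col_north col out) := by unfold Spec_tilt_col_north; infer_instance

-- ===== CLAIM (what is proved, stated in full; the proofs are below) =====
def Claim_equal_tilt_col_north : Prop := ∀ (col : List String), Dom_tilt_col_north col → Pre_tilt_col_north col → Spec_tilt_col_north col (tilt_col_north col)
-- ===== LEMMAS AND PROOFS =====

-- A prefix of the accumulator at least as long as the index passes through A's loop unchanged.
theorem tiltA_shift : ∀ (rest pref nc : List String) (idx : Nat), nc.length ≤ idx →
    tiltA_loop rest (pref.length + idx) (pref ++ nc) = pref ++ tiltA_loop rest idx nc := by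
  intro rest
  induction rest with
  | nil => intro _ _ _ _; simp [tiltA_loop]
  | cons val rest ih =>
    intro pref nc idx hle
    by_cases hC : val = "#"
    · have hO : val ≠ "O" := by subst hC; decide
      simp only [tiltA_loop, if_neg hO, if_pos hC]
      have hpad : pref.length + idx - (pref ++ nc).length = idx - nc.length := by simp; omega
      rw [hpad, show pref ++ nc ++ List.replicate (idx - nc.length) "." ++ ["#"]
            = pref ++ (nc ++ List.replicate (idx - nc.length) "." ++ ["#"]) by simp]
      rw [show pref.length + idx + 1 = pref.length + (idx + 1) from by omega]
      exact ih pref _ (idx + 1) (by simp; omega)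
    · by_cases hO : val = "O"
      · simp only [tiltA_loop, if_pos hO, if_neg hC]
        rw [show pref ++ nc ++ ["O"] = pref ++ (nc ++ ["O"]) by simp]
        rw [show pref.length + idx + 1 = pref.length + (idx + 1) from by omega]
        exact ih pref _ (idx + 1) (by simp; omega)
      · simp only [tiltA_loop, if_neg hO, if_neg hC]
        rw [show pref.length + idx + 1 = pref.length + (idx + 1) from by omega]
        exact ih pref _ (idx + 1) (by omega)

-- Through a '#'-free prefix A's loop just appends one "O" per round rock.
theorem tiltA_seg : ∀ (pre : List String), "#" ∉ pre → ∀ (rest nc : List String) (idx : Nat),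
    tiltA_loop (pre ++ rest) idx nc = tiltA_loop rest (idx + pre.length) (nc ++ List.replicate (pre.count "O") "O") := by
  intro pre
  induction pre with
  | nil => intro _ rest nc idx; simp [List.count_nil]
  | cons val pre ih =>
    intro hmem rest nc idx
    have hC : val ≠ "#" := by intro h; exact hmem (by simp [h])
    have hmem' : "#" ∉ pre := fun h => hmem (List.mem_cons_of_mem _ h)
    by_cases hO : val = "O"
    · simp only [List.cons_append, tiltA_loop, if_pos hO, if_neg hC]
      rw [ih hmem' rest (nc ++ ["O"]) (idx + 1)]
      have : nc ++ ["O"] ++ List.replicate (pre.count "O") "O" = nc ++ List.replicate ((val :: pre).count "O") "O" := by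
        subst hO
        simp [List.replicate_succ, List.append_assoc]
      rw [this]
      congr 1
      simp; omega
    · simp only [List.cons_append, tiltA_loop, if_neg hO, if_neg hC]
      rw [ih hmem' rest nc (idx + 1)]
      have hcnt : (val :: pre).count "O" = pre.count "O" := by
        simp [hO]
      rw [hcnt]
      congr 1
      simp; omega

-- On a '#'-free column A returns rocks then dots.
theorem tiltA_noHash (col : List String) (h : "#" ∉ col) :
    tilt_col_north col = List.replicate (col.count "O") "O" ++ List.replicate (col.length - col.count "O") "." := by
  unfold tilt_col_north
  have := tiltA_seg col h [] [] 0
  simp only [List.append_nil, List.nil_append] at this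
  rw [this]
  simp [tiltA_loop]

-- A decomposes at the first '#' exactly like B's recursion.
theorem tiltA_split (pre suf : List String) (h : "#" ∉ pre) :
    tilt_col_north (pre ++ "#" :: suf) = tilt_col_north pre ++ ["#"] ++ tilt_col_north suf := by
  have hk : pre.count "O" ≤ pre.length := List.count_le_length
  unfold tilt_col_north
  rw [tiltA_seg pre h ("#" :: suf) [] 0]
  simp only [List.nil_append, Nat.zero_add]
  have hO : ("#" : String) ≠ "O" := by decide
  simp only [tiltA_loop, if_neg hO, if_true]
  set nc2 := List.replicate (pre.count "O") "O" ++ List.replicate (pre.length - (List.replicate (pre.count "O") "O").length) "." ++ ["#"] with hnc2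
  have hlen : nc2.length = pre.length + 1 := by simp [hnc2]; omega
  have hshift := tiltA_shift suf nc2 [] 0 (by simp)
  simp only [List.append_nil, Nat.add_zero] at hshift
  rw [hlen] at hshift
  rw [hshift]
  have hpre0 : tiltA_loop pre 0 [] = List.replicate (pre.count "O") "O" := by
    have := tiltA_seg pre h [] [] 0
    simpa [tiltA_loop] using this
  have hpad : (pre ++ "#" :: suf).length - (nc2 ++ tiltA_loop suf 0 []).length
      = suf.length - (tiltA_loop suf 0 []).length := by
    simp [hlen]; omega
  rw [hpre0, hpad, hnc2]
  simp [List.append_assoc]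

-- B's recursion, unfolded on each branch of index?.
theorem alt_none (col : List String) (h : PySem.List.index? col "#" = none) :
    tilt_col_north_alt col = List.replicate (PySem.List.count col "O") "O" ++
        List.replicate (col.length - PySem.List.count col "O") "." := by
  rw [tilt_col_north_alt]
  split
  · next i heq => rw [h] at heq; cases heq
  · rfl

theorem alt_some (col : List String) (i : Nat) (h : PySem.List.index? col "#" = some i) :
    tilt_col_north_alt col = tilt_col_north_alt (col.take i) ++ ["#"] ++ tilt_col_north_alt (col.drop (i + 1)) := by
  rw [tilt_col_north_alt]
  split
  · next j heq => rw [h] at heq; cases heq; rfl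
  · next heq => rw [h] at heq; cases heq

theorem main_eq : ∀ (n : Nat) (col : List String), col.length ≤ n →
    tilt_col_north col = tilt_col_north_alt col := by
  intro n
  induction n with
  | zero =>
    intro col hl
    have : col = [] := List.eq_nil_of_length_eq_zero (by omega)
    subst this
    rw [alt_none [] (by simp [PySem.List.index?_eq_idxOf?])]
    simp [tilt_col_north, tiltA_loop, PySem.List.count]
  | succ n ih =>
    intro col hl
    cases h : PySem.List.index? col "#" with
    | none =>
      have hmem : "#" ∉ col := (PySem.List.index?_eq_none_iff _ _).mp h
      rw [alt_none col h, tiltA_noHash col hmem, PySem.List.count_eq]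
    | some i =>
      obtain ⟨pre, suf, hcol, hlen, hpre⟩ := (PySem.List.index?_eq_some_iff _ _ _).mp h
      have htake : col.take i = pre := by
        subst hcol; rw [← hlen]; simp
      have hdrop : col.drop (i + 1) = suf := by
        subst hcol; rw [← hlen]
        rw [show pre ++ "#" :: suf = (pre ++ ["#"]) ++ suf by simp,
            show pre.length + 1 = (pre ++ ["#"]).length by simp]
        exact List.drop_left
      rw [alt_some col i h, htake, hdrop, hcol, tiltA_split pre suf hpre]
      have hlsuf : suf.length ≤ n := by
        subst hcol; simp at hl; omega
      have hlpre : pre.length ≤ n := by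
        subst hcol; simp at hl; omega
      rw [ih pre hlpre, ih suf hlsuf]

-- ===== VERDICT (by name: the statement is the Claim_ definition above) =====
theorem tilt_col_north_spec : Claim_equal_tilt_col_north := by
  intro col _ _
  unfold Spec_tilt_col_north
  exact main_eq col.length col (le_refl _)
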